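-- pv_equiv track=rewrite | github.com/anthonyceponis/british-informatics-olympiad-solutions | 2017/[1]-coloured-triangles.py | getOpposite
-- ===== SOURCE A (Python) =====
-- def getOpposite(col1, col2):
--     cols = [col1, col2]
--     r_found = False
--     g_found = False
--     b_found = False
--
--     for i in cols:
--         if (i == "R"): r_found = True
--         elif (i == "G"): g_found = True
--         elif (i == "B"): b_found = True
--
--     if (r_found == False): return "R"
--     elif (g_found == False): return "G"
--     elif (b_found == False): return "B"
-- ===== SOURCE B (Python) =====
-- def getOpposite(col1, col2):
--     for c in "RGB":
--         if c != col1 and c != col2: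
--             return c
-- ===== Notes on version B (the rewrite author's own statement) =====
-- stated objective: simpler
-- what changed: B drops the three presence flags and the loop over the inputs; it loops over the candidate colours "RGB" and returns the first one distinct from both inputs.
import Mathlib
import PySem

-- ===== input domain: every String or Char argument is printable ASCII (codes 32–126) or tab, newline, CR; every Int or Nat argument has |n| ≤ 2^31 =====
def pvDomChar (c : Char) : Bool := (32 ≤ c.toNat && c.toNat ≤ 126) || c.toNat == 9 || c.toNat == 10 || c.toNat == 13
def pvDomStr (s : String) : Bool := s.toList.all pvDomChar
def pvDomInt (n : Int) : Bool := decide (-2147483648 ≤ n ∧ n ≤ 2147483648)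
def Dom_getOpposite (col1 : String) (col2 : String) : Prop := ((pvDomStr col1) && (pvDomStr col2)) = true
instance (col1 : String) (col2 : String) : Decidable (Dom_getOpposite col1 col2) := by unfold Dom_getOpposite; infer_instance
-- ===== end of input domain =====

-- ===== PORT A =====
-- Port of A: presence flags (r,g,b) built by a fold over the input list [col1, col2],
-- then the first flag still false decides the answer. The final else-branch ("") is
-- unreachable: two inputs cannot set all three flags.
def getOpposite (col1 : String) (col2 : String) : String :=
  let cols : List String := [col1, col2]
  let st : Bool × Bool × Bool :=
    cols.foldl (fun s i =>
      if i = "R" then (true, s.2.1, s.2.2)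
      else if i = "G" then (s.1, true, s.2.2)
      else if i = "B" then (s.1, s.2.1, true)
      else s) (false, false, false)
  if st.1 = false then "R"
  else if st.2.1 = false then "G"
  else if st.2.2 = false then "B"
  else ""

-- ===== PORT B =====
-- B changes why and why not: loop over the candidate colours "RGB", return the first
-- one distinct from both inputs (the getD "" branch is unreachable: one of three
-- candidates always differs from both of the two inputs).
def getOpposite_alt (col1 : String) (col2 : String) : String :=
  (["R", "G", "B"].find? (fun c => c ≠ col1 && c ≠ col2)).getD ""

-- ===== PRECONDITION & SPEC =====
def Spec_getOpposite (col1 : String) (col2 : String) (out : String) : Prop := out = getOpposite_alt col1 col2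
instance (col1 : String) (col2 : String) (out : String) : Decidable (Spec_getOpposite col1 col2 out) := by unfold Spec_getOpposite; infer_instance

-- ===== CLAIM (what is proved, stated in full; the proofs are below) =====
def Claim_equal_getOpposite : Prop := ∀ (col1 : String) (col2 : String), Dom_getOpposite col1 col2 → Spec_getOpposite col1 col2 (getOpposite col1 col2)

-- ===== LEMMAS AND PROOFS =====

-- ===== VERDICT (by name: the statement is the Claim_ definition above) =====
theorem getOpposite_spec : Claim_equal_getOpposite := by
  intro col1 col2 _
  unfold Spec_getOpposite getOpposite getOpposite_alt
  simp only [List.foldl, List.find?]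
  split_ifs <;> simp_all [eq_comm]
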